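-- pv_equiv track=rewrite | github.com/maneloy/hello-world | Exercises/AlgoyProg1/ej6_3.py | reemplazar_digitos
-- ===== SOURCE A (Python) =====
-- def reemplazar_digitos(cadena, char, reemplazos_maximos):
--     cadena_final = ""
--     maximo = 0
--     for letra in cadena:
--         if letra.isdigit() and maximo < reemplazos_maximos:
--             cadena_final += char
--             maximo += 1
--         else:
--             cadena_final += letra
--     return cadena_final
-- ===== SOURCE B (Python) =====
-- def reemplazar_digitos(cadena, char, reemplazos_maximos):
--     final = list(cadena)
--     positions = [i for i, c in enumerate(cadena) if c.isdigit()]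
--     for i in positions[:max(0, reemplazos_maximos)]:
--         final[i] = char
--     return "".join(final)
-- ===== Notes on version B (the rewrite author's own statement) =====
-- stated objective: alternative
-- what changed: Replaces the single fused loop with a running counter and an accumulator string by an index-building pass (enumerate digit positions), a clamped slice of the first max(0, reemplazos_maximos) positions, targeted assignments into a char list, and one join.
import Mathlib
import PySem

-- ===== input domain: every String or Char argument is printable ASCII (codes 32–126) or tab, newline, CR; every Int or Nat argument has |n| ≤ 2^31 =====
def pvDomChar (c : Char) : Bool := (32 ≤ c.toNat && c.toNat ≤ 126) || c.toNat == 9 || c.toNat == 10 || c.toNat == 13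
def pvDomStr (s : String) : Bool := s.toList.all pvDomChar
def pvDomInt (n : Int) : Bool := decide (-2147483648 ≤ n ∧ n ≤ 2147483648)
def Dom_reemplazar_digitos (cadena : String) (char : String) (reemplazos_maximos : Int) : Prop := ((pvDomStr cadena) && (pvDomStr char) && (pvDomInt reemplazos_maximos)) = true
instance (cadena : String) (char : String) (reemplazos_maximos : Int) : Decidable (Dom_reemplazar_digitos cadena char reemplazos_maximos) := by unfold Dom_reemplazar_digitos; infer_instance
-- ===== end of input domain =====

-- B replaces A's fused loop-with-counter by: enumerate the digit positions, slice off the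
-- first max(0, reemplazos_maximos) of them, overwrite those positions in a char list, join.

-- ===== PORT A =====
def reemplazar_digitos (cadena : String) (char : String) (reemplazos_maximos : Int) : String :=
  let r := cadena.toList.foldl (fun (st : List Char × Int) letra =>
    if PySem.Chars.isdigit letra && decide (st.2 < reemplazos_maximos)
    then (st.1 ++ char.toList, st.2 + 1)
    else (st.1 ++ [letra], st.2)) ([], 0)
  String.mk r.1

-- ===== PORT B =====
def reemplazar_digitos_alt (cadena : String) (char : String) (reemplazos_maximos : Int) : String :=
  let final : List (List Char) := cadena.toList.map (fun c => [c])
  let positions : List Int :=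
    ((PySem.List.enumerate cadena.toList).filter (fun p => PySem.Chars.isdigit p.2)).map (·.1)
  let sel := PySem.List.slice positions none (some (max 0 reemplazos_maximos))
  let final := sel.foldl (fun cs i => PySem.List.pySetD cs i char.toList) final
  String.mk final.flatten

-- ===== PRECONDITION & SPEC =====
def Spec_reemplazar_digitos (cadena : String) (char : String) (reemplazos_maximos : Int) (out : String) : Prop := out = reemplazar_digitos_alt cadena char reemplazos_maximos
instance (cadena : String) (char : String) (reemplazos_maximos : Int) (out : String) : Decidable (Spec_reemplazar_digitos cadena char reemplazos_maximos out) := by unfold Spec_reemplazar_digitos; infer_instance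

-- ===== CLAIM (what is proved, stated in full; the proofs are below) =====
def Claim_equal_reemplazar_digitos : Prop := ∀ (cadena : String) (char : String) (reemplazos_maximos : Int), Dom_reemplazar_digitos cadena char reemplazos_maximos → Spec_reemplazar_digitos cadena char reemplazos_maximos (reemplazar_digitos cadena char reemplazos_maximos)

-- ===== LEMMAS AND PROOFS =====

-- Reference function: replace the first (up to) k digits of l by ch.
def pvR (ch : List Char) : List Char → Int → List Char
  | [], _ => []
  | c :: t, k =>
    if PySem.Chars.isdigit c ∧ 0 < k then ch ++ pvR ch t (k - 1) else c :: pvR ch t k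

lemma pvR_nonpos (ch : List Char) (l : List Char) (k : Int) (hk : k ≤ 0) :
    pvR ch l k = l := by
  induction l with
  | nil => rfl
  | cons c t ih =>
    simp only [pvR]
    rw [if_neg (by rintro ⟨-, h⟩; omega), ih]

-- A's fold, with accumulator pulled out and the counter turned into remaining budget.
lemma pvA_eq_R (ch : List Char) (k : Int) (l : List Char) :
    ∀ (acc : List Char) (m : Int),
      (l.foldl (fun (st : List Char × Int) letra =>
        if PySem.Chars.isdigit letra && decide (st.2 < k)
        then (st.1 ++ ch, st.2 + 1)
        else (st.1 ++ [letra], st.2)) (acc, m)).1 = acc ++ pvR ch l (k - m) := by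
  induction l with
  | nil => intro acc m; simp [pvR]
  | cons c t ih =>
    intro acc m
    simp only [List.foldl_cons]
    by_cases hd : PySem.Chars.isdigit c = true
    · by_cases hm : m < k
      · rw [if_pos (by simp [hd, hm])]
        rw [ih]
        simp only [pvR]
        rw [if_pos ⟨hd, by omega⟩]
        have : k - (m + 1) = k - m - 1 := by omega
        rw [this, List.append_assoc]
      · rw [if_neg (by simp [hd, hm])]
        rw [ih]
        simp only [pvR]
        rw [if_neg (by rintro ⟨-, h⟩; omega)]
        simp
    · rw [if_neg (by simp [hd])]
      rw [ih]
      simp only [pvR]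
      rw [if_neg (by rintro ⟨h, -⟩; exact hd h)]
      simp

lemma pvEnumerate_shift (l : List Char) : ∀ (s : Int),
    PySem.List.enumerate l (s + 1) = (PySem.List.enumerate l s).map (fun p => (p.1 + 1, p.2)) := by
  induction l with
  | nil => intro s; simp [PySem.List.enumerate_nil]
  | cons c t ih =>
    intro s
    rw [PySem.List.enumerate_cons, PySem.List.enumerate_cons, List.map_cons, ih (s + 1)]

lemma pvPos_nonneg (l : List Char) (i : Int)
    (h : i ∈ ((PySem.List.enumerate l 0).filter (fun p => PySem.Chars.isdigit p.2)).map (·.1)) :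
    0 ≤ i := by
  simp only [List.mem_map, List.mem_filter] at h
  obtain ⟨p, ⟨hp, -⟩, rfl⟩ := h
  rw [PySem.List.mem_enumerate_iff] at hp
  obtain ⟨k, hk, rfl⟩ := hp
  simp

lemma pvFold_shift (ch : List Char) (ps : List Int) (h : ∀ i ∈ ps, 0 ≤ i) :
    ∀ (x : List Char) (cs : List (List Char)),
    ((ps.map (fun i => i + 1)).foldl (fun cs i => PySem.List.pySetD cs i ch) (x :: cs))
      = x :: ps.foldl (fun cs i => PySem.List.pySetD cs i ch) cs := by
  induction ps with
  | nil => intro x cs; simp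
  | cons i t ih =>
    intro x cs
    have hi : (0:Int) ≤ i := h i (by simp)
    simp only [List.map_cons, List.foldl_cons]
    rw [PySem.List.pySetD_of_nonneg _ _ (by omega : (0:Int) ≤ i + 1),
        PySem.List.pySetD_of_nonneg _ _ hi]
    have : (i + 1).toNat = i.toNat + 1 := by omega
    rw [this, List.set_cons_succ]
    exact ih (fun j hj => h j (by simp [hj])) _ _

lemma pvPositions_shift (t : List Char) :
    ((((PySem.List.enumerate t 0).map (fun p => (p.1 + 1, p.2))).filter
        (fun p => PySem.Chars.isdigit p.2)).map (·.1))
    = ((((PySem.List.enumerate t 0).filter (fun p => PySem.Chars.isdigit p.2)).map (·.1)).map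
        (fun i => i + 1)) := by
  rw [List.filter_map]
  simp [Function.comp_def, List.map_map]

lemma pvFlatten_singletons (l : List Char) : (l.map (fun c => [c])).flatten = l := by
  induction l with
  | nil => rfl
  | cons c t ih => simp [ih]

-- B's core, as the expression in reemplazar_digitos_alt, equals pvR.
lemma pvB_eq_R (ch : List Char) (l : List Char) : ∀ (k : Int),
    ((PySem.List.slice (((PySem.List.enumerate l 0).filter
        (fun p => PySem.Chars.isdigit p.2)).map (·.1)) none (some (max 0 k))).foldl
      (fun cs i => PySem.List.pySetD cs i ch) (l.map (fun c => [c]))).flatten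
    = pvR ch l k := by
  induction l with
  | nil => intro k; simp [PySem.List.enumerate_nil, PySem.List.slice, pvR]
  | cons c t ih =>
    intro k
    have hslice : ∀ (m : Int) (ps : List Int),
        PySem.List.slice ps none (some (max 0 m)) = ps.take (max 0 m).toNat := by
      intro m ps; exact PySem.List.slice_to ps (by omega)
    have hnn := pvPos_nonneg t
    rw [PySem.List.enumerate_cons, pvEnumerate_shift t 0]
    by_cases hd : PySem.Chars.isdigit c = true
    · simp only [List.filter_cons]
      rw [if_pos (by simpa using hd)]
      simp only [List.map_cons]
      rw [pvPositions_shift t]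
      by_cases hk : 0 < k
      · rw [hslice]
        have hn : (max 0 k).toNat = ((max 0 k).toNat - 1) + 1 := by omega
        rw [hn, List.take_succ_cons, ← List.map_take]
        simp only [List.foldl_cons]
        rw [PySem.List.pySetD_of_nonneg _ _ (le_refl (0 : Int))]
        simp only [Int.toNat_zero, List.set_cons_zero]
        rw [pvFold_shift ch _ (fun i hi => hnn i (List.mem_of_mem_take hi)) ch
          (t.map (fun c => [c]))]
        rw [List.flatten_cons]
        have hk1 : ((max 0 k).toNat - 1 : Nat) = (max 0 (k - 1)).toNat := by omega
        rw [hk1]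
        have hih := ih (k - 1)
        rw [hslice (k - 1)] at hih
        rw [hih]
        simp [pvR, hd, hk]
      · have hz : (max 0 k).toNat = 0 := by omega
        rw [hslice, hz, List.take_zero, List.foldl_nil, List.flatten_cons,
          pvFlatten_singletons, pvR_nonpos ch _ k (by omega)]
        simp
    · simp only [List.filter_cons]
      rw [if_neg (by simpa using hd)]
      simp only [List.map_cons]
      rw [pvPositions_shift t, hslice, ← List.map_take]
      rw [pvFold_shift ch _ (fun i hi => hnn i (List.mem_of_mem_take hi)) [c]
        (t.map (fun c => [c]))]
      rw [List.flatten_cons]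
      have hih := ih k
      rw [hslice k] at hih
      rw [hih]
      simp [pvR, hd]

-- ===== VERDICT (by name: the statement is the Claim_ definition above) =====
theorem reemplazar_digitos_spec : Claim_equal_reemplazar_digitos := by
  intro cadena char k _
  unfold Spec_reemplazar_digitos reemplazar_digitos reemplazar_digitos_alt
  simp only
  rw [pvA_eq_R char.toList k cadena.toList [] 0, pvB_eq_R]
  simp
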